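-- pv_equiv track=rewrite | github.com/mikey641/GlobalZeroShotTRE | scripts/prepare_v4c_native_reasoning.py | chain_terminal_label
-- ===== SOURCE A (Python) =====
-- def chain_terminal_label(turns):
--     """Return (label, terminal_qid) from teacher's parsed yes/no walk; or (None, None)."""
--     qids = ['Q1', 'Q2', 'Q3', 'Q4']
--     parsed = []
--     for i, t in enumerate(turns):
--         if i >= 4:
--             return None, None
--         p = t.get('parsed')
--         if p not in ('yes', 'no'):
--             return None, None
--         parsed.append(p)
--     n = len(parsed)
--     if n == 2:
--         if parsed[1] == 'yes':
--             return 'EQUAL', 'Q2'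
--     elif n == 3:
--         if parsed[1] == 'no' and parsed[2] == 'yes':
--             return 'BEFORE', 'Q3'
--     elif n == 4:
--         if parsed[1] == 'no' and parsed[2] == 'no':
--             return ('AFTER', 'Q4') if parsed[3] == 'yes' else ('VAGUE', 'Q4')
--     return None, None
-- ===== SOURCE B (Python) =====
-- def chain_terminal_label(turns):
--     """Return (label, terminal_qid) from teacher's parsed yes/no walk; or (None, None)."""
--     if not turns or turns[0].get('parsed') not in ('yes', 'no'):
--         return None, None
--     return _walk(turns[1:], 2)
--
-- def _walk(rest, q):
--     # State machine: at question q (2..4), consume one teacher answer.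
--     if not rest:
--         return None, None
--     p = rest[0].get('parsed')
--     tail = rest[1:]
--     if p == 'yes':
--         if not tail:
--             return ('EQUAL', 'BEFORE', 'AFTER')[q - 2], 'Q%d' % q
--         return None, None
--     if p == 'no':
--         if not tail and q == 4:
--             return 'VAGUE', 'Q4'
--         if tail and q < 4:
--             return _walk(tail, q + 1)
--     return None, None
-- ===== Notes on version B (the rewrite author's own statement) =====
-- stated objective: alternative
-- what changed: A validates the whole chain into a parsed list and dispatches on its length with an n==2/3/4 branch ladder; B is a recursive state machine that walks the tail one answer at a time carrying the current question number q, deriving the label positionally from ('EQUAL','BEFORE','AFTER')[q-2] and 'Q%d'%q, never building the parsed list or branching on length.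
import Mathlib
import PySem

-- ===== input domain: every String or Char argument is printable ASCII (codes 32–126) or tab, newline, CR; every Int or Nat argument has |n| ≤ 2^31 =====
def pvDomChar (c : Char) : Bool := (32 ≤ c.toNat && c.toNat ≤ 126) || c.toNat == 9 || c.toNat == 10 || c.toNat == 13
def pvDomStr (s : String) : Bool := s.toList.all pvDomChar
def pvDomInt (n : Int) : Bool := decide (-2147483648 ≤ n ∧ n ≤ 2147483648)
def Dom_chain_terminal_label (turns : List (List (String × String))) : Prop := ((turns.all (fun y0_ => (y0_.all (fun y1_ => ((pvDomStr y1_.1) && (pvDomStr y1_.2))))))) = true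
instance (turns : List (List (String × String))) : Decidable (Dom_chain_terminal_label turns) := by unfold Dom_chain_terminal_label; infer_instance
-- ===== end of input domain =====

-- B replaces A's validate-then-dispatch-on-length structure by a recursive state machine
-- walking the tail with a question counter q, deriving the label positionally (alternative).


-- ===== PORT A =====
-- validation loop of A: per-turn index check (i >= 4 -> early (None,None)),
-- t.get('parsed') must be 'yes'/'no'; none = early return (None, None)
def chainLoopA (i : Nat) (ts : List (List (String × String))) (acc : List String) :
    Option (List String) :=
  match ts with
  | [] => some acc
  | t :: rest =>
    if i ≥ 4 then none
    else
      match (PySem.Dict.mk t).get? "parsed" with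
      | some p => if p = "yes" ∨ p = "no" then chainLoopA (i+1) rest (acc ++ [p]) else none
      | none => none

def chain_terminal_label (turns : List (List (String × String))) : Option String × Option String :=
  match chainLoopA 0 turns [] with
  | none => (none, none)
  | some parsed =>
    let n := parsed.length
    if n = 2 then
      if PySem.List.pyGet? parsed 1 = some "yes" then (some "EQUAL", some "Q2")
      else (none, none)
    else if n = 3 then
      if PySem.List.pyGet? parsed 1 = some "no" ∧ PySem.List.pyGet? parsed 2 = some "yes" then
        (some "BEFORE", some "Q3")
      else (none, none)
    else if n = 4 then
      if PySem.List.pyGet? parsed 1 = some "no" ∧ PySem.List.pyGet? parsed 2 = some "no" then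
        if PySem.List.pyGet? parsed 3 = some "yes" then (some "AFTER", some "Q4")
        else (some "VAGUE", some "Q4")
      else (none, none)
    else (none, none)

-- ===== PORT B =====
-- B's _walk: recursive state machine; q is the current question number (2..4)
def chainWalk (rest : List (List (String × String))) (q : Int) : Option String × Option String :=
  match rest with
  | [] => (none, none)
  | t :: tail =>
    let p := (PySem.Dict.mk t).get? "parsed"
    if p = some "yes" then
      if tail = [] then
        -- ('EQUAL','BEFORE','AFTER')[q-2], 'Q%d' % q
        match PySem.List.pyGet? ["EQUAL", "BEFORE", "AFTER"] (q - 2) with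
        | some lab => (some lab, some ("Q" ++ PySem.Int.toStr q))
        | none => (none, none)   -- unreachable: q stays in {2,3,4}
      else (none, none)
    else if p = some "no" then
      if tail = [] ∧ q = 4 then (some "VAGUE", some "Q4")
      else if tail ≠ [] ∧ q < 4 then chainWalk tail (q + 1)
      else (none, none)
    else (none, none)

def chain_terminal_label_alt (turns : List (List (String × String))) : Option String × Option String :=
  match turns with
  | [] => (none, none)
  | t :: rest =>
    if (PySem.Dict.mk t).get? "parsed" = some "yes" ∨ (PySem.Dict.mk t).get? "parsed" = some "no"
    then chainWalk rest 2
    else (none, none)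

-- ===== PRECONDITION & SPEC =====
def Spec_chain_terminal_label (turns : List (List (String × String))) (out : Option String × Option String) : Prop := out = chain_terminal_label_alt turns
instance (turns : List (List (String × String))) (out : Option String × Option String) : Decidable (Spec_chain_terminal_label turns out) := by unfold Spec_chain_terminal_label; infer_instance

-- ===== CLAIM (what is proved, stated in full; the proofs are below) =====
def Claim_equal_chain_terminal_label : Prop := ∀ (turns : List (List (String × String))), Dom_chain_terminal_label turns → Spec_chain_terminal_label turns (chain_terminal_label turns)

-- ===== LEMMAS AND PROOFS =====

def chainValid (p : Option String) : Bool := p = some "yes" ∨ p = some "no"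

def chainStr (t : List (String × String)) : String :=
  ((PySem.Dict.mk t).get? "parsed").getD ""

theorem loopA_long (ts : List (List (String × String))) : ∀ (i : Nat) (acc : List String),
    i ≤ 4 → 4 < i + ts.length → chainLoopA i ts acc = none := by
  induction ts with
  | nil => intro i acc hle h; simp at h; omega
  | cons t rest ih =>
    intro i acc hle h
    unfold chainLoopA
    by_cases hi : i ≥ 4
    · simp [hi]
    · cases hp : (PySem.Dict.mk t).get? "parsed" with
      | none => simp [hi]
      | some p =>
        simp only []
        rw [if_neg hi]
        split_ifs with hv
        · exact ih (i+1) (acc ++ [p]) (by omega) (by simp at h ⊢; omega)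
        · rfl

theorem loopA_short (ts : List (List (String × String))) : ∀ (i : Nat) (acc : List String),
    i + ts.length ≤ 4 →
    chainLoopA i ts acc =
      if ts.all (fun t => chainValid ((PySem.Dict.mk t).get? "parsed"))
      then some (acc ++ ts.map chainStr)
      else none := by
  induction ts with
  | nil => intro i acc h; simp [chainLoopA]
  | cons t rest ih =>
    intro i acc h
    have hi : ¬ i ≥ 4 := by simp at h; omega
    unfold chainLoopA
    rw [if_neg hi]
    cases hp : (PySem.Dict.mk t).get? "parsed" with
    | none => simp [chainValid, hp]
    | some p =>
      show (if p = "yes" ∨ p = "no" then chainLoopA (i+1) rest (acc ++ [p]) else none) = _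
      by_cases hpv : p = "yes" ∨ p = "no"
      · rw [if_pos hpv, ih (i+1) (acc ++ [p]) (by simp at h ⊢; omega)]
        by_cases hr : rest.all (fun t => chainValid ((PySem.Dict.mk t).get? "parsed")) = true
        · rw [if_pos hr, if_pos (by
            simp [List.all_cons, chainValid, hp, hpv]
            intro x hx
            have h2 := List.all_eq_true.mp hr x hx
            simp [chainValid] at h2
            tauto)]
          simp [chainStr, hp]
        · rw [if_neg hr, if_neg (by simp [List.all_cons, hr])]
      · rw [if_neg hpv, if_neg (by simp [List.all_cons, chainValid, hp, hpv])]

-- B's walk returns (none,none) once it cannot terminate within question 4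
theorem walk_long (rest : List (List (String × String))) : ∀ (q : Int),
    2 ≤ q → 6 ≤ q + rest.length → chainWalk rest q = (none, none) := by
  induction rest with
  | nil => intro q _ h; simp [chainWalk]
  | cons t tail ih =>
    intro q hq h
    by_cases htail : tail = []
    · subst htail
      have hq5 : 5 ≤ q := by simp at h; omega
      by_cases hy : (PySem.Dict.mk t).get? "parsed" = some "yes"
      · have hget : PySem.List.pyGet? ["EQUAL", "BEFORE", "AFTER"] (q - 2) =
            (none : Option String) := by
          rw [PySem.List.pyGet?_eq_none_iff]
          simp [PySem.Raise.InRange]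
          omega
        simp [chainWalk, hy, hget]
      · by_cases hn : (PySem.Dict.mk t).get? "parsed" = some "no"
        · have hq4 : ¬ q = 4 := by omega
          simp [chainWalk, hn, hq4]
        · simp [chainWalk, hy, hn]
    · by_cases hy : (PySem.Dict.mk t).get? "parsed" = some "yes"
      · simp [chainWalk, hy, htail]
      · by_cases hn : (PySem.Dict.mk t).get? "parsed" = some "no"
        · have hq4 : ¬(tail = [] ∧ q = 4) := fun hc => htail hc.1
          by_cases hlt : q < 4
          · rw [show chainWalk (t :: tail) q = chainWalk tail (q + 1) by
              simp [chainWalk, hn, htail, hlt]]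
            exact ih (q+1) (by omega) (by simp at h ⊢; omega)
          · simp [chainWalk, hn, hq4, hlt]
        · simp [chainWalk, hy, hn]

-- B's walk returns (none,none) whenever some turn in rest is invalid
theorem walk_invalid (rest : List (List (String × String))) : ∀ (q : Int),
    ¬ (rest.all (fun t => chainValid ((PySem.Dict.mk t).get? "parsed")) = true) →
    chainWalk rest q = (none, none) := by
  induction rest with
  | nil => intro q h; simp at h
  | cons t tail ih =>
    intro q h
    by_cases hy : (PySem.Dict.mk t).get? "parsed" = some "yes"
    · have htail : tail ≠ [] := by
        intro he; subst he; exact h (by simp [chainValid, hy])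
      simp [chainWalk, hy, htail]
    · by_cases hn : (PySem.Dict.mk t).get? "parsed" = some "no"
      · have hrest : ¬ (tail.all (fun t => chainValid ((PySem.Dict.mk t).get? "parsed")) = true) := by
          intro hall
          exact h (by simp only [List.all_cons, hall, Bool.and_true]; simp [chainValid, hn])
        have hq4 : ¬(tail = [] ∧ q = 4) := by
          rintro ⟨he, _⟩; subst he; exact hrest (by simp)
        by_cases hlt : tail ≠ [] ∧ q < 4
        · rw [show chainWalk (t :: tail) q = chainWalk tail (q + 1) by
            simp [chainWalk, hn, hlt.1, hlt.2]]
          exact ih (q+1) hrest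
        · simp [chainWalk, hn, hq4, hlt]
      · simp [chainWalk, hy, hn]

theorem eq_all (turns : List (List (String × String))) :
    chain_terminal_label turns = chain_terminal_label_alt turns := by
  by_cases hlen : turns.length > 4
  · rw [chain_terminal_label,
      loopA_long turns 0 [] (by omega) (by simpa using hlen)]
    rcases turns with _ | ⟨a, rest⟩
    · rfl
    · rw [chain_terminal_label_alt]
      split_ifs with ha
      · rw [walk_long rest 2 (by omega) (by simp at hlen ⊢; omega)]
      · rfl
  · rw [chain_terminal_label, loopA_short turns 0 [] (by omega)]
    by_cases hv : turns.all (fun t => chainValid ((PySem.Dict.mk t).get? "parsed")) = true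
    · rw [if_pos hv]
      have hmem : ∀ t ∈ turns, (PySem.Dict.mk t).get? "parsed" = some "yes" ∨
          (PySem.Dict.mk t).get? "parsed" = some "no" := by
        intro t ht
        have h2 := List.all_eq_true.mp hv t ht
        simp [chainValid] at h2
        rcases h2 with h | h <;> simp [h]
      rcases turns with _ | ⟨a, _ | ⟨b, _ | ⟨c, _ | ⟨d, _ | ⟨e, rest⟩⟩⟩⟩⟩
      · rfl
      · rcases hmem a (by simp) with h | h <;>
          simp [chain_terminal_label_alt, chainWalk, chainStr, h]
      · rcases hmem a (by simp) with ha | ha <;> rcases hmem b (by simp) with hb | hb <;>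
          simp [chain_terminal_label_alt, chainWalk, chainStr, ha, hb,
            PySem.List.pyGet?, PySem.List.pyIdx?] <;> decide
      · rcases hmem a (by simp) with ha | ha <;> rcases hmem b (by simp) with hb | hb <;>
          rcases hmem c (by simp) with hc | hc <;>
          simp [chain_terminal_label_alt, chainWalk, chainStr, ha, hb, hc,
            PySem.List.pyGet?, PySem.List.pyIdx?] <;> decide
      · rcases hmem a (by simp) with ha | ha <;> rcases hmem b (by simp) with hb | hb <;>
          rcases hmem c (by simp) with hc | hc <;> rcases hmem d (by simp) with hd | hd <;>
          simp [chain_terminal_label_alt, chainWalk, chainStr, ha, hb, hc, hd,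
            PySem.List.pyGet?, PySem.List.pyIdx?] <;> decide
      · simp at hlen
    · rw [if_neg hv]
      rcases turns with _ | ⟨a, rest⟩
      · simp at hv
      · rw [chain_terminal_label_alt]
        split_ifs with ha
        · rw [walk_invalid rest 2 (by
            intro hrest
            apply hv
            have hca : chainValid ((PySem.Dict.mk a).get? "parsed") = true := by
              simp [chainValid]; tauto
            simp [List.all_cons, hca, hrest])]
        · rfl

-- ===== VERDICT (by name: the statement is the Claim_ definition above) =====
theorem chain_terminal_label_spec : Claim_equal_chain_terminal_label := by
  intro turns _
  unfold Spec_chain_terminal_label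
  exact eq_all turns
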